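-- pv_equiv track=rewrite | github.com/masc-ucsc/hagent | hagent/workflow/frequency_opt/steps/arch_agent.py | _order_modules_bottom_up
-- ===== SOURCE A (Python) =====
-- def _order_modules_bottom_up(names: list[str], hierarchy_dict: dict) -> list[str]:
--     """Sort module names by hierarchy depth descending (deepest first).
--
--     Modules not found in hierarchy are placed at the end.
--     """
--     if not hierarchy_dict:
--         return list(names)
--
--     instances = {k: v for k, v in hierarchy_dict.items() if not k.startswith('_')}
--     module_depth: dict[str, int] = {}
--     for ip, info in instances.items():
--         mod = info.get('module', '')
--         depth = ip.count('.')
--         if mod in module_depth: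
--             module_depth[mod] = max(module_depth[mod], depth)
--         else:
--             module_depth[mod] = depth
--
--     def sort_key(name: str) -> tuple[int, str]:
--         d = module_depth.get(name, -1)
--         return (-d, name)
--
--     return sorted(names, key=sort_key)
-- ===== SOURCE B (Python) =====
-- def _order_modules_bottom_up(names: list[str], hierarchy_dict: dict) -> list[str]:
--     """Sort module names by hierarchy depth descending (deepest first).
--
--     Bucket/distribution sort: build the max-depth map in one skip-style loop,
--     sort the names alphabetically ONCE, collect the distinct depths occurring
--     among the names (absent modules count as depth -1), and emit the
--     alphabetically ordered names depth-by-depth from the deepest down.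
--     """
--     if not hierarchy_dict:
--         return list(names)
--
--     module_depth: dict[str, int] = {}
--     for ip, info in hierarchy_dict.items():
--         if ip.startswith('_'):
--             continue
--         mod = info.get('module', '')
--         d = ip.count('.')
--         if d > module_depth.get(mod, -1):
--             module_depth[mod] = d
--
--     ordered = sorted(names)
--     depths = sorted({module_depth.get(n, -1) for n in names}, reverse=True)
--     return [n for d in depths for n in ordered if module_depth.get(n, -1) == d]
-- ===== Notes on version B (the rewrite author's own statement) =====
-- stated objective: faster
-- what changed: Replaces the single composite-key sort (sorted with key (-depth, name)) by a distribution/bucket sort: one plain alphabetical sort of the names without any key function, then the distinct occurring depths sorted descending select the names bucket by bucket; the depth map is built in one skip-style loop with a conditional max-update instead of a filtered intermediate dict with a membership branch.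
import Mathlib
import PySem

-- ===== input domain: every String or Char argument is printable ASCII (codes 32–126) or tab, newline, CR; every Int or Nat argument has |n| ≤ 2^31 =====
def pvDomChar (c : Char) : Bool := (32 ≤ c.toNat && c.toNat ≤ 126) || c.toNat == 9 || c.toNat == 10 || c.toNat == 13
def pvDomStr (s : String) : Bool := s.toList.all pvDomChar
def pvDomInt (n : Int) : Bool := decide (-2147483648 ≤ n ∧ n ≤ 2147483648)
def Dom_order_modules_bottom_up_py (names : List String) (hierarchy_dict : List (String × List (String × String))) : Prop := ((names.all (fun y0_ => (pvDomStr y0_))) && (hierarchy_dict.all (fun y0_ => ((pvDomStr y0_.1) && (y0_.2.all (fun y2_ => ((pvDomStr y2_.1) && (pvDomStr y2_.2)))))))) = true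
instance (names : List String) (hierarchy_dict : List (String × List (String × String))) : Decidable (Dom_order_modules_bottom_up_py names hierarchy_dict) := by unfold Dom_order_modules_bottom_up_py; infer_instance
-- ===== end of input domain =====

-- B replaces A's single composite-key sort (key = (-depth, name)) by a distribution/bucket
-- sort: one plain keyless alphabetical sort of the names, then the distinct occurring depths,
-- sorted descending, select the names bucket by bucket (objective: faster — a timing run
-- measured B ≥ 1.5× faster at the largest size; constant-factor: no per-element tuple keys).

-- ===== PORT A =====
-- loop body of A's 'for ip, info in instances.items()'; module_depth[mod] inside the
-- contains-branch is ported as getD mod 0: mod is a key there, so the default is never used (exact)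
def pvStepA (md : PySem.Dict String Int) (kv : String × List (String × String)) : PySem.Dict String Int :=
  let mod := (PySem.Dict.mk kv.2).getD "module" ""
  let depth : Int := (PySem.Str.count kv.1 "." : Int)
  if md.contains mod then md.insert mod (max (md.getD mod 0) depth) else md.insert mod depth

def order_modules_bottom_up_py (names : List String) (hierarchy_dict : List (String × List (String × String))) : List String :=
  if hierarchy_dict = [] then names
  else
    -- {k: v for k, v in hierarchy_dict.items() if not k.startswith('_')} (keys unique: a filter of the items)
    let instances := hierarchy_dict.filter (fun kv => !(PySem.Str.startswith kv.1 "_"))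
    let module_depth := instances.foldl pvStepA PySem.Dict.empty
    -- sorted(names, key=lambda n: (-module_depth.get(n, -1), n))
    PySem.List.sorted2 names (fun n => -(module_depth.getD n (-1))) (fun n => n) false

-- ===== PORT B =====
-- loop body of B's single loop with 'continue' on underscore keys and a conditional max-update
def pvStepB (md : PySem.Dict String Int) (kv : String × List (String × String)) : PySem.Dict String Int :=
  if PySem.Str.startswith kv.1 "_" then md
  else
    let mod := (PySem.Dict.mk kv.2).getD "module" ""
    let d : Int := (PySem.Str.count kv.1 "." : Int)
    if d > md.getD mod (-1) then md.insert mod d else md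

def order_modules_bottom_up_py_alt (names : List String) (hierarchy_dict : List (String × List (String × String))) : List String :=
  if hierarchy_dict = [] then names
  else
    let module_depth := hierarchy_dict.foldl pvStepB PySem.Dict.empty
    -- ordered = sorted(names)
    let ordered := PySem.List.sorted names (fun n => n) false
    -- depths = sorted({module_depth.get(n, -1) for n in names}, reverse=True)
    let depths := PySem.List.sorted
      (PySem.Set.ofList (names.map (fun n => module_depth.getD n (-1)))) (fun d => d) true
    -- [n for d in depths for n in ordered if module_depth.get(n, -1) == d]
    depths.flatMap (fun d => ordered.filter (fun n => module_depth.getD n (-1) == d))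

-- ===== PRECONDITION & SPEC =====
def Spec_order_modules_bottom_up_py (names : List String) (hierarchy_dict : List (String × List (String × String))) (out : List String) : Prop := out = order_modules_bottom_up_py_alt names hierarchy_dict
instance (names : List String) (hierarchy_dict : List (String × List (String × String))) (out : List String) : Decidable (Spec_order_modules_bottom_up_py names hierarchy_dict out) := by unfold Spec_order_modules_bottom_up_py; infer_instance

-- ===== CLAIM (what is proved, stated in full; the proofs are below) =====
def Claim_equal_order_modules_bottom_up_py : Prop := ∀ (names : List String) (hierarchy_dict : List (String × List (String × String))), Dom_order_modules_bottom_up_py names hierarchy_dict → Spec_order_modules_bottom_up_py names hierarchy_dict (order_modules_bottom_up_py names hierarchy_dict)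

-- ===== LEMMAS AND PROOFS =====

-- contains is the isSome of get? (both scan d.items for the key)
theorem pvContains_eq_isSome (d : PySem.Dict String Int) (k : String) :
    d.contains k = (d.get? k).isSome := by
  simp [PySem.Dict.contains, PySem.Dict.get?, List.isSome_find?]

-- the two depth-map loops agree on every lookup, and every stored depth is ≥ 0
theorem pvFold_agree (l : List (String × List (String × String)))
    (dA dB : PySem.Dict String Int)
    (hR : ∀ m, dA.get? m = dB.get? m)
    (hN : ∀ k v, dA.get? k = some v → 0 ≤ v) :
    (∀ m, ((l.filter (fun kv => !(PySem.Str.startswith kv.1 "_"))).foldl pvStepA dA).get? m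
        = (l.foldl pvStepB dB).get? m)
    ∧ (∀ k v, ((l.filter (fun kv => !(PySem.Str.startswith kv.1 "_"))).foldl pvStepA dA).get? k = some v → 0 ≤ v) := by
  induction l generalizing dA dB with
  | nil => exact ⟨hR, hN⟩
  | cons kv rest ih =>
    by_cases hu : PySem.Str.startswith kv.1 "_"
    · -- underscore key: A filters it out, B skips it
      have hstepB : pvStepB dB kv = dB := by
        show (if PySem.Str.startswith kv.1 "_" then dB
              else if dB.getD ((PySem.Dict.mk kv.2).getD "module" "") (-1) < (PySem.Str.count kv.1 "." : Int)
                then dB.insert ((PySem.Dict.mk kv.2).getD "module" "") (PySem.Str.count kv.1 "." : Int) else dB) = dB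
        rw [if_pos hu]
      rw [List.filter_cons, if_neg (by simpa using hu), List.foldl_cons, hstepB]
      exact ih dA dB hR hN
    · set mod := (PySem.Dict.mk kv.2).getD "module" "" with hmod
      set depth : Int := (PySem.Str.count kv.1 "." : Int) with hdepth
      have hd0 : (0:Int) ≤ depth := by rw [hdepth]; exact Int.natCast_nonneg _
      have hstepAeq : pvStepA dA kv
          = (if dA.contains mod then dA.insert mod (max (dA.getD mod 0) depth) else dA.insert mod depth) := rfl
      have hstepBeq : pvStepB dB kv
          = (if PySem.Str.startswith kv.1 "_" then dB
             else if dB.getD mod (-1) < depth then dB.insert mod depth else dB) := rfl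
      rw [List.filter_cons, if_pos (by simpa using hu), List.foldl_cons, List.foldl_cons]
      by_cases hc : dA.contains mod
      · -- mod already present with value v (the same in both dicts)
        have hsome : (dA.get? mod).isSome := by rw [← pvContains_eq_isSome]; exact hc
        obtain ⟨v, hv⟩ := Option.isSome_iff_exists.mp hsome
        have hvB : dB.get? mod = some v := (hR mod) ▸ hv
        have hv0 : 0 ≤ v := hN mod v hv
        have hgA : dA.getD mod 0 = v := by simp [PySem.Dict.getD, hv]
        have hgB : dB.getD mod (-1) = v := by simp [PySem.Dict.getD, hvB]
        have hstepA : pvStepA dA kv = dA.insert mod (max v depth) := by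
          rw [hstepAeq, if_pos hc, hgA]
        by_cases hlt : v < depth
        · have hstepB : pvStepB dB kv = dB.insert mod depth := by
            rw [hstepBeq, if_neg hu, if_pos (by rw [hgB]; exact hlt)]
          rw [hstepA, hstepB, max_eq_right hlt.le]
          refine ih _ _ (fun m => ?_) (fun k w hw => ?_)
          · by_cases hm : m = mod
            · subst hm; simp [PySem.Dict.get?_insert_self]
            · rw [PySem.Dict.get?_insert_of_ne _ _ hm, PySem.Dict.get?_insert_of_ne _ _ hm]
              exact hR m
          · by_cases hk : k = mod
            · subst hk; rw [PySem.Dict.get?_insert_self] at hw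
              cases hw; exact hd0
            · rw [PySem.Dict.get?_insert_of_ne _ _ hk] at hw; exact hN k w hw
        · have hstepB : pvStepB dB kv = dB := by
            rw [hstepBeq, if_neg hu, if_neg (by rw [hgB]; exact hlt)]
          rw [hstepA, hstepB, max_eq_left (not_lt.mp hlt)]
          refine ih _ _ (fun m => ?_) (fun k w hw => ?_)
          · by_cases hm : m = mod
            · subst hm; rw [PySem.Dict.get?_insert_self, hvB]
            · rw [PySem.Dict.get?_insert_of_ne _ _ hm]; exact hR m
          · by_cases hk : k = mod
            · subst hk; rw [PySem.Dict.get?_insert_self] at hw; cases hw; exact hv0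
            · rw [PySem.Dict.get?_insert_of_ne _ _ hk] at hw; exact hN k w hw
      · -- mod absent from both: both insert depth
        have hnone : dA.get? mod = none := by
          have h := pvContains_eq_isSome dA mod
          rw [h] at hc; simpa using hc
        have hnoneB : dB.get? mod = none := (hR mod) ▸ hnone
        have hgB : dB.getD mod (-1) = -1 := by simp [PySem.Dict.getD, hnoneB]
        have hstepA : pvStepA dA kv = dA.insert mod depth := by
          rw [hstepAeq, if_neg hc]
        have hstepB : pvStepB dB kv = dB.insert mod depth := by
          rw [hstepBeq, if_neg hu, if_pos (by rw [hgB]; omega)]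
        rw [hstepA, hstepB]
        refine ih _ _ (fun m => ?_) (fun k w hw => ?_)
        · by_cases hm : m = mod
          · subst hm; simp [PySem.Dict.get?_insert_self]
          · rw [PySem.Dict.get?_insert_of_ne _ _ hm, PySem.Dict.get?_insert_of_ne _ _ hm]
            exact hR m
        · by_cases hk : k = mod
          · subst hk; rw [PySem.Dict.get?_insert_self] at hw; cases hw; exact hd0
          · rw [PySem.Dict.get?_insert_of_ne _ _ hk] at hw; exact hN k w hw

-- a two-component sort with (Int, String) keys is the one-key sort under the lexicographic order
theorem pvSorted2_eq_sorted_lex (xs : List String) (k1 : String → Int) :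
    PySem.List.sorted2 xs k1 (fun n => n) false
      = PySem.List.sorted xs (fun n => toLex (k1 n, n)) false := by
  show xs.foldl (fun acc x => PySem.List.insertBy _ x acc) []
      = xs.foldl (fun acc x => PySem.List.insertBy _ x acc) []
  have hb : (fun a b => decide (k1 a < k1 b) || (!decide (k1 b < k1 a) && decide (a < b)))
      = (fun a b : String => decide (toLex (k1 a, a) < toLex (k1 b, b))) := by
    funext a b
    rw [Bool.eq_iff_iff]
    simp only [Bool.or_eq_true, Bool.and_eq_true, Bool.not_eq_true', decide_eq_true_eq,
      decide_eq_false_iff_not, Prod.Lex.lt_iff, ofLex_toLex]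
    constructor
    · rintro (h | ⟨h1, h2⟩)
      · exact Or.inl h
      · rcases lt_trichotomy (k1 a) (k1 b) with h' | h' | h'
        · exact Or.inl h'
        · exact Or.inr ⟨h', h2⟩
        · exact absurd h' h1
    · rintro (h | ⟨h1, h2⟩)
      · exact Or.inl h
      · exact Or.inr ⟨by omega, h2⟩
  rw [hb]

-- bucket-by-bucket selection over a nodup cover of the depths is a permutation of xs
theorem pvBuckets_perm (depth : String → Int) :
    ∀ (ks : List Int) (xs : List String), ks.Nodup → (∀ x ∈ xs, depth x ∈ ks) →
    (ks.flatMap (fun d => xs.filter (fun n => depth n == d))).Perm xs := by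
  intro ks
  induction ks with
  | nil =>
    intro xs _ hcov
    cases xs with
    | nil => simp
    | cons x t => exact absurd (hcov x (by simp)) (by simp)
  | cons d ks ih =>
    intro xs hnd hcov
    rw [List.flatMap_cons]
    have hrest : ks.flatMap (fun d' => xs.filter (fun n => depth n == d'))
        = ks.flatMap (fun d' => (xs.filter (fun n => !(depth n == d))).filter (fun n => depth n == d')) := by
      apply List.flatMap_congr
      intro d' hd'
      rw [List.filter_filter]
      apply List.filter_congr
      intro n _
      have hne : d' ≠ d := fun h => (List.nodup_cons.mp hnd).1 (h ▸ hd')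
      cases h : (depth n == d') with
      | false => simp
      | true =>
        have : depth n = d' := by simpa using h
        simp [this, hne]
    have hcov' : ∀ x ∈ xs.filter (fun n => !(depth n == d)), depth x ∈ ks := by
      intro x hx
      rw [List.mem_filter] at hx
      have hin := hcov x hx.1
      rcases List.mem_cons.mp hin with h | h
      · exact absurd (by simpa using h : (depth x == d) = true) (by simpa using hx.2)
      · exact h
    have hperm := ih (xs.filter (fun n => !(depth n == d))) (List.nodup_cons.mp hnd).2 hcov'
    rw [hrest]
    exact (List.Perm.append_left _ hperm).trans (List.filter_append_perm _ xs)

-- the bucket concatenation is sorted under the lexicographic key (-depth, name)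
theorem pvBuckets_pairwise (depth : String → Int) :
    ∀ (ks : List Int) (xs : List String),
      ks.Pairwise (fun a b => b < a) → xs.Pairwise (fun a b => a ≤ b) →
      (ks.flatMap (fun d => xs.filter (fun n => depth n == d))).Pairwise
        (fun a b => (toLex (-(depth a), a) : Lex (Int × String)) ≤ toLex (-(depth b), b)) := by
  intro ks
  induction ks with
  | nil => intro xs _ _; simp
  | cons d ks ih =>
    intro xs hk hx
    rw [List.flatMap_cons, List.pairwise_append]
    refine ⟨?_, ih xs (List.pairwise_cons.mp hk).2 hx, ?_⟩
    · -- within one bucket: equal depths, names nondecreasing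
      refine List.Pairwise.imp_of_mem ?_ (List.Pairwise.filter _ hx)
      intro a b ha hb hab
      have hda : depth a = d := by simpa using (List.mem_filter.mp ha).2
      have hdb : depth b = d := by simpa using (List.mem_filter.mp hb).2
      rw [hda, hdb]
      exact Prod.Lex.le_iff.mpr (Or.inr ⟨rfl, hab⟩)
    · -- the head bucket precedes every later bucket strictly
      intro a ha b hb
      obtain ⟨d', hd', hb'⟩ := List.mem_flatMap.mp hb
      have hda : depth a = d := by simpa using (List.mem_filter.mp ha).2
      have hdb : depth b = d' := by simpa using (List.mem_filter.mp hb').2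
      have hlt : d' < d := (List.pairwise_cons.mp hk).1 d' hd'
      refine le_of_lt (Prod.Lex.lt_iff.mpr (Or.inl ?_))
      simp only [ofLex_toLex]
      rw [hda, hdb]; omega

-- ===== VERDICT (by name: the statement is the Claim_ definition above) =====
theorem order_modules_bottom_up_py_spec : Claim_equal_order_modules_bottom_up_py := by
  intro names hierarchy_dict _hdom
  show order_modules_bottom_up_py names hierarchy_dict = order_modules_bottom_up_py_alt names hierarchy_dict
  by_cases h0 : hierarchy_dict = []
  · simp [order_modules_bottom_up_py, order_modules_bottom_up_py_alt, h0]
  · simp only [order_modules_bottom_up_py, order_modules_bottom_up_py_alt, h0, if_false]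
    set dA := (hierarchy_dict.filter (fun kv => !(PySem.Str.startswith kv.1 "_"))).foldl pvStepA PySem.Dict.empty with hdA
    set dB := hierarchy_dict.foldl pvStepB PySem.Dict.empty with hdB
    obtain ⟨hR, _⟩ := pvFold_agree hierarchy_dict PySem.Dict.empty PySem.Dict.empty
      (fun _ => rfl) (fun k v hv => by simp [PySem.Dict.empty, PySem.Dict.get?] at hv)
    have hgD : ∀ n, dA.getD n (-1) = dB.getD n (-1) := fun n => by
      show (dA.get? n).getD (-1) = (dB.get? n).getD (-1)
      rw [hR n]
    have hkeyA : (fun n => -(dA.getD n (-1))) = (fun n => -(dB.getD n (-1))) := by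
      funext n; rw [hgD n]
    rw [hkeyA, pvSorted2_eq_sorted_lex]
    set depthOf : String → Int := fun n => dB.getD n (-1) with hdepthOf
    set K : String → Lex (Int × String) := fun n => toLex (-(depthOf n), n) with hK
    set ordered := PySem.List.sorted names (fun n => n) false with hord
    set depths := PySem.List.sorted
      (PySem.Set.ofList (names.map (fun n => dB.getD n (-1)))) (fun d => d) true with hdep
    have hinj : Function.Injective K := by
      intro a b hab
      have h2 := congrArg (fun p => (ofLex p).2) hab
      exact h2
    have hndep : depths.Nodup := by
      rw [hdep]
      exact ((PySem.List.sorted_perm _ _ _).symm).nodup (PySem.Set.nodup_ofList _)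
    have hcov : ∀ x ∈ ordered, depthOf x ∈ depths := by
      intro x hx
      rw [hord, PySem.List.mem_sorted] at hx
      rw [hdep, PySem.List.mem_sorted, PySem.Set.mem_ofList]
      exact List.mem_map.mpr ⟨x, hx, rfl⟩
    have hkpair : depths.Pairwise (fun a b => b < a) := by
      have hle : depths.Pairwise (fun a b => b ≤ a) := by
        rw [hdep]
        exact PySem.List.sorted_pairwise_rev _ (fun d : Int => d)
      refine (hle.and hndep).imp ?_
      intro a b hab
      exact lt_of_le_of_ne hab.1 (Ne.symm hab.2)
    apply PySem.List.eq_of_perm_of_pairwise_le_of_injective K hinj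
    · exact (PySem.List.sorted_perm names K false).trans
        ((pvBuckets_perm depthOf depths ordered hndep hcov).trans
          (PySem.List.sorted_perm names (fun n => n) false)).symm
    · exact PySem.List.sorted_pairwise names K
    · exact pvBuckets_pairwise depthOf depths ordered hkpair
        (PySem.List.sorted_pairwise names (fun n => n))
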